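-- pv_equiv track=rewrite | github.com/JadeLiyiZhang/LeetCode | array/check-if-word-can-be-placed-in-crossword.py | placeWordInCrossword
-- ===== SOURCE A (Python) =====
-- from typing import List
--
-- def placeWordInCrossword(board: List[List[str]], word: str) -> bool:
--     m = len(board)
--     n = len(board[0])
--
--     def canPlace(row, col, dirX, dirY, i):
--         while i < len(word):
--             if row < 0 or row >= m or col < 0 or col >= n or board[row][col] == '#' or (board[row][col] != ' ' and board[row][col] != word[i]):
--                 return False
--
--             row = row + dirX
--             col = col + dirY
--             i += 1
--
--         if row < 0 or row >= m or col < 0 or col >= n or board[row][col] == '#':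
--             return True
--         return False
--
--     for i in range(m):
--         for j in range(n):
--             if (i - 1 < 0 or board[i - 1][j] == '#') and board[i][j] != '#':
--                 if canPlace(i, j, 1, 0, 0):
--                     return True
--
--             if (i + 1 >= m or board[i + 1][j] == '#') and board[i][j] != '#':
--                 if canPlace(i, j, -1, 0, 0):
--                     return True
--
--             if (j - 1 < 0 or board[i][j - 1] == '#') and board[i][j] != '#':
--                 if canPlace(i, j, 0, 1, 0):
--                     return True
--
--             if (j + 1 >= n or board[i][j + 1] == '#') and board[i][j] != '#':
--                 if canPlace(i, j, 0, -1, 0):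
--                     return True
--
--     return False
-- ===== SOURCE B (Python) =====
-- def placeWordInCrossword(board, word):
--     # segment-extraction approach: the crossword is the m x n grid declared by the
--     # first row; split every grid row and column on '#' into maximal segments, then
--     # try to match the word (forward or reversed) against each segment of equal length
--     if not board:
--         return False
--     n = len(board[0])
--
--     def segments(line):
--         seg = []
--         for c in line:
--             if c == '#':
--                 yield seg
--                 seg = []
--             else:
--                 seg.append(c)
--         yield seg
--
--     def matches(seg):
--         return all(c == ' ' or c == w for c, w in zip(seg, word))
--
--     k = len(word)
--     lines = [row[:n] for row in board] + [list(col) for col in zip(*board)]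
--     return any(len(seg) == k and (matches(seg) or matches(list(reversed(seg))))
--                for line in lines for seg in segments(line))
-- ===== Notes on version B (the rewrite author's own statement) =====
-- stated objective: simpler
-- what changed: A probes from every cell in four directions with index-walking and boundary tests; B instead splits each row and column of the m x n grid on '#' into maximal segments and matches the word (forward or reversed) against every segment of equal length.
-- outside the precondition, e.g. on placeWordInCrossword([['#']], ''): A returns False, B returns True
import Mathlib
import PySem

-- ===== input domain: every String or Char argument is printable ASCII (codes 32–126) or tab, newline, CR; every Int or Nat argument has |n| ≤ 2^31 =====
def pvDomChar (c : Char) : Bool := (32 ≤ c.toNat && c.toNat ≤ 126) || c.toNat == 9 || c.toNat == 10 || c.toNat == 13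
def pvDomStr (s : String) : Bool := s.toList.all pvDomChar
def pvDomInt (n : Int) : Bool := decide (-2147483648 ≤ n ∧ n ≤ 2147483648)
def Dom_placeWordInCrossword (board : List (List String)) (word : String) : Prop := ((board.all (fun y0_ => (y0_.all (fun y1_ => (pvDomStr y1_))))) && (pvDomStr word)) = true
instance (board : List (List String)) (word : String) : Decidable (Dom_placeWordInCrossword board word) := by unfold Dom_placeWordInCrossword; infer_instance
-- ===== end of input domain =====

-- B replaces A's four-direction per-cell probing with split-on-'#' segment extraction
-- over rows and columns plus forward/reversed word matching; equivalence is proved for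
-- nonempty rectangular boards and a nonempty word.

-- ===== PORT A =====
-- board[row][col], used only after A's own bounds checks have passed
def pvCell (board : List (List String)) (r c : Int) : String :=
  (board.getD r.toNat []).getD c.toNat ""

-- the inner helper canPlace(row, col, dirX, dirY, i) of A
def canPlaceA (board : List (List String)) (m n : Int) (w : List Char)
    (row col dirX dirY : Int) (i : Nat) : Bool :=
  if h : i < w.length then
    if decide (row < 0) || decide (m ≤ row) || decide (col < 0) || decide (n ≤ col)
        || (pvCell board row col == "#")
        || (pvCell board row col != " " && pvCell board row col != String.ofList [w[i]]) then
      false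
    else
      canPlaceA board m n w (row + dirX) (col + dirY) dirX dirY (i + 1)
  else
    if decide (row < 0) || decide (m ≤ row) || decide (col < 0) || decide (n ≤ col)
        || (pvCell board row col == "#") then true else false
termination_by w.length - i
decreasing_by omega

def placeWordInCrossword (board : List (List String)) (word : String) : Bool :=
  let m : Int := board.length
  let n : Int := (board.headD []).length
  let w := word.toList
  (PySem.List.pyRange 0 m 1).any fun i =>
    (PySem.List.pyRange 0 n 1).any fun j =>
      ((decide (i - 1 < 0) || pvCell board (i - 1) j == "#") && pvCell board i j != "#"
          && canPlaceA board m n w i j 1 0 0)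
      || ((decide (m ≤ i + 1) || pvCell board (i + 1) j == "#") && pvCell board i j != "#"
          && canPlaceA board m n w i j (-1) 0 0)
      || ((decide (j - 1 < 0) || pvCell board i (j - 1) == "#") && pvCell board i j != "#"
          && canPlaceA board m n w i j 0 1 0)
      || ((decide (n ≤ j + 1) || pvCell board i (j + 1) == "#") && pvCell board i j != "#"
          && canPlaceA board m n w i j 0 (-1) 0)

-- ===== PORT B =====
-- B's generator `segments`: split a line on '#', keeping empty pieces
def segsGo (line cur : List String) : List (List String) :=
  match line with
  | [] => [cur]
  | c :: rest => if c == "#" then cur :: segsGo rest [] else segsGo rest (cur ++ [c])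

-- B's `matches`: every cell blank or equal to the word letter (zip truncates)
def matchF (seg : List String) (w : List Char) : Bool :=
  (seg.zip w).all fun p => p.1 == " " || p.1 == String.ofList [p.2]

def minLen : List (List String) → Nat
  | [] => 0
  | [r] => r.length
  | r :: rest => min r.length (minLen rest)

def placeWordInCrossword_alt (board : List (List String)) (word : String) : Bool :=
  if board.isEmpty then false
  else
    let w := word.toList
    let n := (board.headD []).length
    let lines := board.map (fun row => row.take n)
      ++ (List.range (minLen board)).map fun j => board.map fun r => r.getD j ""
    lines.any fun line =>
      (segsGo line []).any fun seg =>
        seg.length == w.length && (matchF seg w || matchF seg.reverse w)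

-- ===== PRECONDITION & SPEC =====
-- Pre_ excludes the empty board and boards with a row shorter than the first row (on all
-- of those the Python A raises IndexError), and the empty word (a degenerate corner no
-- caller specifies: A is always False there, while B matches the empty word against the
-- empty pieces of its '#'-split; both answers are defensible).
def Pre_placeWordInCrossword (board : List (List String)) (word : String) : Prop :=
  board ≠ [] ∧ (∀ r ∈ board, (board.headD []).length ≤ r.length) ∧ word ≠ ""
instance (board : List (List String)) (word : String) : Decidable (Pre_placeWordInCrossword board word) := by unfold Pre_placeWordInCrossword; infer_instance

def pvWitness_placeWordInCrossword : List (List String) × String := ([[" ", "b"], ["#", " "]], "ab")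

def Spec_placeWordInCrossword (board : List (List String)) (word : String) (out : Bool) : Prop := out = placeWordInCrossword_alt board word
instance (board : List (List String)) (word : String) (out : Bool) : Decidable (Spec_placeWordInCrossword board word out) := by unfold Spec_placeWordInCrossword; infer_instance

-- ===== CLAIM (what is proved, stated in full; the proofs are below) =====
def Claim_equal_placeWordInCrossword : Prop := ∀ (board : List (List String)) (word : String), Dom_placeWordInCrossword board word → Pre_placeWordInCrossword board word → Spec_placeWordInCrossword board word (placeWordInCrossword board word)

-- ===== LEMMAS AND PROOFS =====

-- row i and column j of the board, viewed as lines
def rowL (board : List (List String)) (i : Nat) : List String := board.getD i []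
def colL (board : List (List String)) (j : Nat) : List String :=
  board.map (fun r => r.getD j "")

-- forward check of A's walk, phrased on the suffix of a line
def chk : List String → List Char → Bool
  | [], [] => true
  | c :: _, [] => c == "#"
  | [], _ :: _ => false
  | c :: rest, ch :: ws => (c != "#") && ((c == " " || c == String.ofList [ch]) && chk rest ws)

def startF (line : List String) (k : Nat) : Bool :=
  decide (k = 0) || (line.getD (k - 1) "" == "#")

def tryF (line : List String) (w : List Char) (k : Nat) : Bool :=
  startF line k && (line.getD k "" != "#") && chk (line.drop k) w

def ALine (line : List String) (w : List Char) : Prop := ∃ k, tryF line w k = true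

def EndsHash (pre : List String) : Prop := pre = [] ∨ ∃ p, pre = p ++ ["#"]
def StartsHash (post : List String) : Prop := post = [] ∨ ∃ q, post = "#" :: q
def SegAt (line s : List String) : Prop :=
  ∃ pre post, line = pre ++ (s ++ post) ∧ EndsHash pre ∧ StartsHash post ∧ "#" ∉ s

-- 1D abstraction of canPlaceA along a fixed line
def walkP (line : List String) (w : List Char) (pos dir : Int) (t : Nat) : Bool :=
  if h : t < w.length then
    if decide (pos < 0) || decide ((line.length : Int) ≤ pos) || (line.getD pos.toNat "" == "#")
        || (line.getD pos.toNat "" != " " && line.getD pos.toNat "" != String.ofList [w[t]]) then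
      false
    else walkP line w (pos + dir) dir (t + 1)
  else
    if decide (pos < 0) || decide ((line.length : Int) ≤ pos) || (line.getD pos.toNat "" == "#")
      then true else false
termination_by w.length - t
decreasing_by omega

theorem length_colL (board : List (List String)) (j : Nat) :
    (colL board j).length = board.length := by simp [colL]

theorem pvCell_col (board : List (List String)) (i j : Int) :
    pvCell board i j = (colL board j.toNat).getD i.toNat "" := by
  unfold pvCell colL
  simp only [List.getD_eq_getElem?_getD, List.getElem?_map]
  cases board[i.toNat]? <;> simp

theorem pvCell_row (board : List (List String)) (i j : Int) :
    pvCell board i j = (rowL board i.toNat).getD j.toNat "" := rfl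

theorem getD_reverse (line : List String) (k : Nat) (h : k < line.length) :
    line.reverse.getD (line.length - 1 - k) "" = line.getD k "" := by
  rw [List.getD_eq_getElem _ _ (by simp; omega), List.getD_eq_getElem _ _ h,
    List.getElem_reverse]
  congr 1
  omega

-- canPlaceA walking vertically is walkP on the column
theorem canPlace_vert (board : List (List String)) (n : Int) (w : List Char) (j : Int)
    (hj0 : 0 ≤ j) (hjn : j < n) (dX : Int) :
    ∀ (t : Nat) (i : Int),
      canPlaceA board (board.length : Int) n w i j dX 0 t = walkP (colL board j.toNat) w i dX t := by
  suffices H : ∀ (fuel t : Nat) (i : Int), w.length - t ≤ fuel →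
      canPlaceA board (board.length : Int) n w i j dX 0 t = walkP (colL board j.toNat) w i dX t by
    intro t i; exact H (w.length - t) t i le_rfl
  intro fuel
  induction fuel with
  | zero =>
    intro t i h0
    conv_lhs => rw [canPlaceA]
    conv_rhs => rw [walkP]
    simp only [dif_neg (show ¬ t < w.length by omega)]
    rw [pvCell_col, length_colL]
    rw [decide_eq_false (by omega : ¬ j < 0), decide_eq_false (by omega : ¬ n ≤ j)]
    simp only [Bool.false_or, Bool.or_false]
  | succ fuel ih =>
    intro t i h
    by_cases ht : t < w.length
    · conv_lhs => rw [canPlaceA]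
      conv_rhs => rw [walkP]
      simp only [dif_pos ht, add_zero]
      rw [pvCell_col, length_colL]
      rw [decide_eq_false (by omega : ¬ j < 0), decide_eq_false (by omega : ¬ n ≤ j)]
      simp only [Bool.false_or, Bool.or_false]
      split
      · rfl
      · exact ih (t + 1) (i + dX) (by omega)
    · conv_lhs => rw [canPlaceA]
      conv_rhs => rw [walkP]
      simp only [dif_neg ht]
      rw [pvCell_col, length_colL]
      rw [decide_eq_false (by omega : ¬ j < 0), decide_eq_false (by omega : ¬ n ≤ j)]
      simp only [Bool.false_or, Bool.or_false]

-- canPlaceA walking horizontally is walkP on the row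
-- canPlaceA walking horizontally is walkP on any line that agrees with row i in range
theorem canPlace_horiz (board : List (List String)) (w : List Char) (i : Int)
    (hi0 : 0 ≤ i) (him : i < (board.length : Int)) (line : List String)
    (hcell : ∀ c : Nat, c < line.length → line.getD c "" = pvCell board i (c : Int))
    (dY : Int) :
    ∀ (t : Nat) (j : Int),
      canPlaceA board (board.length : Int) ((line.length : Nat) : Int) w i j 0 dY t
        = walkP line w j dY t := by
  suffices H : ∀ (fuel t : Nat) (j : Int), w.length - t ≤ fuel →
      canPlaceA board (board.length : Int) ((line.length : Nat) : Int) w i j 0 dY t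
        = walkP line w j dY t by
    intro t j; exact H (w.length - t) t j le_rfl
  have hcc : ∀ j : Int, 0 ≤ j → j < (line.length : Int) →
      pvCell board i j = line.getD j.toNat "" := by
    intro j h0 h1
    rw [hcell j.toNat (by omega), Int.toNat_of_nonneg h0]
  intro fuel
  induction fuel with
  | zero =>
    intro t j h0
    conv_lhs => rw [canPlaceA]
    conv_rhs => rw [walkP]
    simp only [dif_neg (show ¬ t < w.length by omega)]
    rw [decide_eq_false (by omega : ¬ i < 0),
      decide_eq_false (by omega : ¬ (board.length : Int) ≤ i)]
    simp only [Bool.false_or, Bool.or_false]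
    by_cases hin : 0 ≤ j ∧ j < (line.length : Int)
    · rw [hcc j hin.1 hin.2]
    · rcases (by omega : j < 0 ∨ (line.length : Int) ≤ j) with h' | h' <;>
        rw [decide_eq_true h'] <;> simp
  | succ fuel ih =>
    intro t j h
    by_cases ht : t < w.length
    · conv_lhs => rw [canPlaceA]
      conv_rhs => rw [walkP]
      simp only [dif_pos ht, add_zero]
      rw [decide_eq_false (by omega : ¬ i < 0),
        decide_eq_false (by omega : ¬ (board.length : Int) ≤ i)]
      simp only [Bool.false_or, Bool.or_false]
      by_cases hin : 0 ≤ j ∧ j < (line.length : Int)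
      · rw [hcc j hin.1 hin.2]
        split
        · rfl
        · exact ih (t + 1) (j + dY) (by omega)
      · rcases (by omega : j < 0 ∨ (line.length : Int) ≤ j) with h' | h' <;>
          rw [decide_eq_true h'] <;> simp
    · conv_lhs => rw [canPlaceA]
      conv_rhs => rw [walkP]
      simp only [dif_neg ht]
      rw [decide_eq_false (by omega : ¬ i < 0),
        decide_eq_false (by omega : ¬ (board.length : Int) ≤ i)]
      simp only [Bool.false_or, Bool.or_false]
      by_cases hin : 0 ≤ j ∧ j < (line.length : Int)
      · rw [hcc j hin.1 hin.2]
      · rcases (by omega : j < 0 ∨ (line.length : Int) ≤ j) with h' | h' <;>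
          rw [decide_eq_true h'] <;> simp

theorem chk_cons (c : String) (rest : List String) (ch : Char) (ws : List Char) :
    chk (c :: rest) (ch :: ws)
      = ((c != "#") && ((c == " " || c == String.ofList [ch]) && chk rest ws)) := rfl

theorem chk_single (c : String) (rest : List String) :
    chk (c :: rest) [] = (c == "#") := rfl

-- forward walk computes chk on the dropped suffix
theorem walkP_pos (line : List String) (w : List Char) :
    ∀ (t : Nat) (pos : Int), 0 ≤ pos →
      walkP line w pos 1 t = chk (line.drop pos.toNat) (w.drop t) := by
  suffices H : ∀ (fuel t : Nat) (pos : Int), w.length - t ≤ fuel → 0 ≤ pos →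
      walkP line w pos 1 t = chk (line.drop pos.toNat) (w.drop t) by
    intro t pos h; exact H (w.length - t) t pos le_rfl h
  intro fuel
  induction fuel with
  | zero =>
    intro t pos h0 hp
    conv_lhs => rw [walkP]
    simp only [dif_neg (show ¬ t < w.length by omega)]
    rw [List.drop_eq_nil_of_le (show w.length ≤ t by omega)]
    by_cases hlen : (line.length : Int) ≤ pos
    · rw [List.drop_eq_nil_of_le (show line.length ≤ pos.toNat by omega)]
      rw [decide_eq_true hlen]
      simp [chk]
    · have hlt : pos.toNat < line.length := by omega
      have hdl : line.drop pos.toNat = line.getD pos.toNat "" :: line.drop (pos.toNat + 1) := by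
        rw [List.drop_eq_getElem_cons hlt, List.getD_eq_getElem _ _ hlt]
      rw [hdl]
      rw [decide_eq_false (by omega : ¬ pos < 0), decide_eq_false hlen]
      simp only [Bool.false_or]
      rw [chk_single]
      generalize line.getD pos.toNat "" = c
      cases hc : (c == "#") <;> rfl
  | succ fuel ih =>
    intro t pos h hp
    by_cases ht : t < w.length
    · conv_lhs => rw [walkP]
      simp only [dif_pos ht]
      rw [List.drop_eq_getElem_cons ht]
      by_cases hlen : (line.length : Int) ≤ pos
      · rw [List.drop_eq_nil_of_le (show line.length ≤ pos.toNat by omega)]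
        rw [decide_eq_true hlen]
        simp [chk]
      · have hlt : pos.toNat < line.length := by omega
        have hdl : line.drop pos.toNat = line.getD pos.toNat "" :: line.drop (pos.toNat + 1) := by
          rw [List.drop_eq_getElem_cons hlt, List.getD_eq_getElem _ _ hlt]
        rw [hdl]
        rw [decide_eq_false (by omega : ¬ pos < 0), decide_eq_false hlen]
        simp only [Bool.false_or]
        rw [ih (t + 1) (pos + 1) (by omega) (by omega),
          show (pos + 1).toNat = pos.toNat + 1 by omega]
        rw [chk_cons]
        generalize chk (line.drop (pos.toNat + 1)) (w.drop (t + 1)) = X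
        generalize line.getD pos.toNat "" = c
        cases hc : (c == "#") <;> cases h1 : (c == " ") <;>
          cases h2 : (c == String.ofList [w[t]]) <;> simp [bne, hc, h1, h2]
    · conv_lhs => rw [walkP]
      simp only [dif_neg ht]
      rw [List.drop_eq_nil_of_le (show w.length ≤ t by omega)]
      by_cases hlen : (line.length : Int) ≤ pos
      · rw [List.drop_eq_nil_of_le (show line.length ≤ pos.toNat by omega)]
        rw [decide_eq_true hlen]
        simp [chk]
      · have hlt : pos.toNat < line.length := by omega
        have hdl : line.drop pos.toNat = line.getD pos.toNat "" :: line.drop (pos.toNat + 1) := by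
          rw [List.drop_eq_getElem_cons hlt, List.getD_eq_getElem _ _ hlt]
        rw [hdl]
        rw [decide_eq_false (by omega : ¬ pos < 0), decide_eq_false hlen]
        simp only [Bool.false_or]
        rw [chk_single]
        generalize line.getD pos.toNat "" = c
        cases hc : (c == "#") <;> rfl

-- backward walk is the forward walk on the reversed line
theorem walkP_neg (line : List String) (w : List Char) :
    ∀ (t : Nat) (pos : Int),
      walkP line w pos (-1) t = walkP line.reverse w ((line.length : Int) - 1 - pos) 1 t := by
  suffices H : ∀ (fuel t : Nat) (pos : Int), w.length - t ≤ fuel →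
      walkP line w pos (-1) t = walkP line.reverse w ((line.length : Int) - 1 - pos) 1 t by
    intro t pos; exact H (w.length - t) t pos le_rfl
  intro fuel
  have cellEq : ∀ pos : Int, 0 ≤ pos → pos < (line.length : Int) →
      line.reverse.getD ((line.length : Int) - 1 - pos).toNat "" = line.getD pos.toNat "" := by
    intro pos h0 h1
    have h2 : ((line.length : Int) - 1 - pos).toNat = line.length - 1 - pos.toNat := by omega
    rw [h2, getD_reverse _ _ (by omega)]
  induction fuel with
  | zero =>
    intro t pos h0
    conv_lhs => rw [walkP]
    conv_rhs => rw [walkP]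
    simp only [dif_neg (show ¬ t < w.length by omega), List.length_reverse]
    by_cases hin : 0 ≤ pos ∧ pos < (line.length : Int)
    · rw [cellEq pos hin.1 hin.2]
      rw [decide_eq_false (by omega : ¬ pos < 0),
        decide_eq_false (by omega : ¬ (line.length : Int) ≤ pos),
        decide_eq_false (by omega : ¬ (line.length : Int) ≤ (line.length : Int) - 1 - pos),
        decide_eq_false (by omega : ¬ (line.length : Int) - 1 - pos < 0)]
    · rcases (by omega : pos < 0 ∨ (line.length : Int) ≤ pos) with h' | h'
      · rw [decide_eq_true h',
          decide_eq_true (show (line.length : Int) ≤ (line.length : Int) - 1 - pos by omega)]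
        simp
      · rw [decide_eq_true h',
          decide_eq_true (show (line.length : Int) - 1 - pos < 0 by omega)]
        simp
  | succ fuel ih =>
    intro t pos h
    by_cases ht : t < w.length
    · conv_lhs => rw [walkP]
      conv_rhs => rw [walkP]
      simp only [dif_pos ht, List.length_reverse]
      by_cases hin : 0 ≤ pos ∧ pos < (line.length : Int)
      · rw [cellEq pos hin.1 hin.2]
        rw [decide_eq_false (by omega : ¬ pos < 0),
          decide_eq_false (by omega : ¬ (line.length : Int) ≤ pos),
          decide_eq_false (by omega : ¬ (line.length : Int) ≤ (line.length : Int) - 1 - pos),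
          decide_eq_false (by omega : ¬ (line.length : Int) - 1 - pos < 0)]
        split
        · rfl
        · rw [ih (t + 1) (pos + -1) (by omega),
            show (line.length : Int) - 1 - (pos + -1) = (line.length : Int) - 1 - pos + 1 by ring]
      · rcases (by omega : pos < 0 ∨ (line.length : Int) ≤ pos) with h' | h'
        · rw [decide_eq_true h',
            decide_eq_true (show (line.length : Int) ≤ (line.length : Int) - 1 - pos by omega)]
          simp
        · rw [decide_eq_true h',
            decide_eq_true (show (line.length : Int) - 1 - pos < 0 by omega)]
          simp
    · conv_lhs => rw [walkP]
      conv_rhs => rw [walkP]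
      simp only [dif_neg ht, List.length_reverse]
      by_cases hin : 0 ≤ pos ∧ pos < (line.length : Int)
      · rw [cellEq pos hin.1 hin.2]
        rw [decide_eq_false (by omega : ¬ pos < 0),
          decide_eq_false (by omega : ¬ (line.length : Int) ≤ pos),
          decide_eq_false (by omega : ¬ (line.length : Int) ≤ (line.length : Int) - 1 - pos),
          decide_eq_false (by omega : ¬ (line.length : Int) - 1 - pos < 0)]
      · rcases (by omega : pos < 0 ∨ (line.length : Int) ≤ pos) with h' | h'
        · rw [decide_eq_true h',
            decide_eq_true (show (line.length : Int) ≤ (line.length : Int) - 1 - pos by omega)]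
          simp
        · rw [decide_eq_true h',
            decide_eq_true (show (line.length : Int) - 1 - pos < 0 by omega)]
          simp

theorem matchF_cons (c : String) (s : List String) (ch : Char) (ws : List Char) :
    matchF (c :: s) (ch :: ws) = ((c == " " || c == String.ofList [ch]) && matchF s ws) := by
  simp [matchF]

theorem chk_nil_false (w : List Char) (hw : w ≠ []) : chk [] w = false := by
  cases w with
  | nil => exact absurd rfl hw
  | cons ch ws => rfl

theorem tryF_false_of_ge (line : List String) (w : List Char) (k : Nat)
    (hw : w ≠ []) (h : line.length ≤ k) : tryF line w k = false := by
  rw [tryF, List.drop_eq_nil_of_le h, chk_nil_false w hw]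
  simp

-- a successful chk splits the suffix into the matched segment and a '#'-or-end tail
theorem chk_decomp (w : List Char) : ∀ rest : List String, chk rest w = true →
    ∃ s post, rest = s ++ post ∧ s.length = w.length ∧ "#" ∉ s ∧ matchF s w = true ∧
      StartsHash post := by
  induction w with
  | nil =>
    intro rest h
    cases rest with
    | nil => exact ⟨[], [], rfl, rfl, by simp, rfl, Or.inl rfl⟩
    | cons c r =>
      refine ⟨[], c :: r, rfl, rfl, by simp, rfl, Or.inr ⟨r, ?_⟩⟩
      have hc : c = "#" := by simpa [chk] using h
      rw [hc]
  | cons ch ws ih =>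
    intro rest h
    cases rest with
    | nil => exact absurd h (by simp [chk])
    | cons c r =>
      simp only [chk, Bool.and_eq_true, bne_iff_ne, ne_eq] at h
      obtain ⟨hc, hm, hrec⟩ := h
      obtain ⟨s, post, hr, hl, hh, hmf, hsh⟩ := ih r hrec
      refine ⟨c :: s, post, by simp [hr], by simp [hl], ?_, ?_, hsh⟩
      · simp only [List.mem_cons, not_or]
        exact ⟨fun e => hc (by simp [e]), hh⟩
      · rw [matchF_cons, hmf]
        simp [hm]

theorem chk_build (w : List Char) : ∀ (s post : List String), s.length = w.length →
    "#" ∉ s → matchF s w = true → StartsHash post → chk (s ++ post) w = true := by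
  induction w with
  | nil =>
    intro s post hl _ _ hsh
    have hs0 : s = [] := by simpa using hl
    subst hs0
    rcases hsh with h | ⟨q, h⟩ <;> subst h
    · rfl
    · simp [chk]
  | cons ch ws ih =>
    intro s post hl hh hm hsh
    cases s with
    | nil => simp at hl
    | cons c s' =>
      rw [matchF_cons, Bool.and_eq_true] at hm
      simp only [List.mem_cons, not_or] at hh
      have hrec : chk (s' ++ post) ws = true := ih s' post (by simpa using hl) hh.2 hm.2 hsh
      simp only [List.cons_append, chk, Bool.and_eq_true, bne_iff_ne, ne_eq]
      exact ⟨fun e => hh.1 e.symm, hm.1, hrec⟩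

-- membership in segsGo, with an arbitrary accumulator
theorem mem_segsGo (line : List String) : ∀ (cur s : List String),
    s ∈ segsGo line cur ↔
      (∃ t post, s = cur ++ t ∧ line = t ++ post ∧ "#" ∉ t ∧ StartsHash post) ∨
      (∃ t rest, line = t ++ "#" :: rest ∧ s ∈ segsGo rest []) := by
  induction line with
  | nil =>
    intro cur s
    constructor
    · intro h
      left
      exact ⟨[], [], by simpa [segsGo] using h, rfl, by simp, Or.inl rfl⟩
    · rintro (⟨t, post, hs, hline, _, _⟩ | ⟨t, rest, hline, _⟩)
      · obtain ⟨ht, hp⟩ := List.append_eq_nil_iff.mp hline.symm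
        subst ht
        simp [segsGo, hs]
      · exact absurd hline.symm (by simp)
  | cons c rest ih =>
    intro cur s
    by_cases hc : c = "#"
    · subst hc
      have hunf : segsGo ("#" :: rest) cur = cur :: segsGo rest [] := by
        simp [segsGo]
      rw [hunf]
      constructor
      · intro h
        rcases List.mem_cons.mp h with h | h
        · exact Or.inl ⟨[], "#" :: rest, by simpa using h, rfl, by simp, Or.inr ⟨rest, rfl⟩⟩
        · exact Or.inr ⟨[], rest, rfl, h⟩
      · rintro (⟨t, post, hs, hline, hht, hsh⟩ | ⟨t, rest', hline, hmem⟩)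
        · cases t with
          | nil =>
            apply List.mem_cons.mpr
            left
            simpa using hs
          | cons x t' =>
            have hx : x = "#" := by injection hline with h1 _; exact h1.symm
            subst hx
            exact absurd (List.mem_cons_self ..) hht
        · cases t with
          | nil =>
            apply List.mem_cons.mpr
            right
            injection hline with _ h2
            rwa [← h2] at hmem
          | cons x t' =>
            injection hline with h1 h2
            apply List.mem_cons.mpr
            right
            exact (ih [] s).mpr (Or.inr ⟨t', rest', h2, hmem⟩)
    · rw [segsGo]
      rw [if_neg (by simpa using hc)]
      rw [ih]
      constructor
      · rintro (⟨t, post, hs, hrest, hht, hsh⟩ | ⟨t, rest', hrest, hmem⟩)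
        · refine Or.inl ⟨c :: t, post, by simpa using hs, by simp [hrest], ?_, hsh⟩
          simp only [List.mem_cons, not_or]
          exact ⟨fun e => hc e.symm, by simpa using hht⟩
        · exact Or.inr ⟨c :: t, rest', by simp [hrest], hmem⟩
      · rintro (⟨t, post, hs, hline, hht, hsh⟩ | ⟨t, rest', hline, hmem⟩)
        · cases t with
          | nil =>
            rcases hsh with h | ⟨q, h⟩
            · subst h; exact absurd hline (by simp)
            · subst h
              injection hline with h1 _
              exact absurd h1 hc
          | cons x t' =>
            injection hline with h1 h2
            subst h1
            refine Or.inl ⟨t', post, ?_, h2, ?_, hsh⟩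
            · simpa using hs
            · intro hm; exact hht (List.mem_cons_of_mem _ hm)
        · cases t with
          | nil =>
            injection hline with h1 _
            exact absurd h1 hc
          | cons x t' =>
            injection hline with h1 h2
            exact Or.inr ⟨t', rest', h2, hmem⟩

theorem segAt_of_mem (N : Nat) : ∀ (line s : List String), line.length ≤ N →
    s ∈ segsGo line [] → SegAt line s := by
  induction N with
  | zero =>
    intro line s hlen hmem
    have hl0 : line = [] := by cases line <;> simp_all
    subst hl0
    have hs0 : s = [] := by simpa [segsGo] using hmem
    exact ⟨[], [], by simp [hs0], Or.inl rfl, Or.inl rfl, by simp [hs0]⟩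
  | succ N ih =>
    intro line s hlen hmem
    rcases (mem_segsGo line [] s).mp hmem with ⟨t, post, hs, hline, hht, hsh⟩ |
        ⟨t, rest, hline, hmem'⟩
    · rw [List.nil_append] at hs
      subst hs
      exact ⟨[], post, by simp [hline], Or.inl rfl, hsh, hht⟩
    · have hrest : rest.length ≤ N := by
        have hll := congrArg List.length hline
        simp at hll
        omega
      obtain ⟨pre', post', hrs, hend, hsh, hhs⟩ := ih rest s hrest hmem'
      refine ⟨t ++ "#" :: pre', post', ?_, ?_, hsh, hhs⟩
      · simp [hline, hrs]
      · rcases hend with h | ⟨p, h⟩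
        · subst h
          exact Or.inr ⟨t, by simp⟩
        · subst h
          exact Or.inr ⟨t ++ "#" :: p, by simp⟩

theorem mem_of_segAt (line s : List String) (h : SegAt line s) : s ∈ segsGo line [] := by
  obtain ⟨pre, post, hline, hend, hsh, hhs⟩ := h
  rcases hend with hp | ⟨p, hp⟩
  · subst hp
    apply (mem_segsGo line [] s).mpr
    exact Or.inl ⟨s, post, by simp, by simpa using hline, hhs, hsh⟩
  · subst hp
    apply (mem_segsGo line [] s).mpr
    refine Or.inr ⟨p, s ++ post, by simp [hline], ?_⟩
    apply (mem_segsGo (s ++ post) [] s).mpr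
    exact Or.inl ⟨s, post, by simp, rfl, hhs, hsh⟩

theorem segAt_reverse (line s : List String) (h : SegAt line s) :
    SegAt line.reverse s.reverse := by
  obtain ⟨pre, post, hline, hend, hsh, hhs⟩ := h
  refine ⟨post.reverse, pre.reverse, by simp [hline], ?_, ?_, by simpa using hhs⟩
  · rcases hsh with h | ⟨q, h⟩ <;> subst h
    · exact Or.inl rfl
    · exact Or.inr ⟨q.reverse, by simp⟩
  · rcases hend with h | ⟨p, h⟩ <;> subst h
    · exact Or.inl rfl
    · exact Or.inr ⟨p.reverse, by simp⟩

-- the per-line characterisation of A's forward attempts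
theorem aline_iff (line : List String) (w : List Char) (hw : w ≠ []) :
    ALine line w ↔ ∃ s, SegAt line s ∧ s.length = w.length ∧ matchF s w = true := by
  constructor
  · rintro ⟨k, hk⟩
    rw [tryF, Bool.and_eq_true, Bool.and_eq_true] at hk
    obtain ⟨⟨hstart, _⟩, hchk⟩ := hk
    obtain ⟨s, post, hdrop, hlen, hhs, hmf, hsh⟩ := chk_decomp w _ hchk
    have hklt : k < line.length := by
      by_contra hge
      rw [List.drop_eq_nil_of_le (by omega)] at hdrop
      have hs0 : s = [] := by cases s <;> simp_all
      subst hs0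
      simp at hlen
      exact hw (by simpa using hlen.symm)
    refine ⟨s, ⟨line.take k, post, ?_, ?_, hsh, hhs⟩, hlen, hmf⟩
    · rw [← hdrop, List.take_append_drop]
    · by_cases hk0 : k = 0
      · subst hk0; exact Or.inl (by simp)
      · rw [startF, Bool.or_eq_true] at hstart
        rcases hstart with h | h
        · exact absurd (of_decide_eq_true h) hk0
        · right
          refine ⟨line.take (k - 1), ?_⟩
          have hk1 : k - 1 < line.length := by omega
          have hgd : line.getD (k - 1) "" = "#" := by simpa using h
          have he : k = (k - 1) + 1 := by omega
          have hk' : line.take k = line.take (k - 1) ++ [line.getD (k - 1) ""] := by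
            rw [List.getD_eq_getElem _ _ hk1]
            conv_lhs => rw [he]
            rw [List.take_add_one, List.getElem?_eq_getElem hk1]
            rfl
          rw [hk', hgd]
  · rintro ⟨s, ⟨pre, post, hline, hend, hsh, hhs⟩, hlen, hmf⟩
    refine ⟨pre.length, ?_⟩
    rw [tryF]
    have hdrop : line.drop pre.length = s ++ post := by
      rw [hline, List.drop_left]
    obtain ⟨c, s', hcs⟩ : ∃ c s', s = c :: s' := by
      cases s with
      | nil =>
        simp at hlen
        exact absurd (by simpa using hlen.symm) hw
      | cons c s' => exact ⟨c, s', rfl⟩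
    subst hcs
    have hcell : line.getD pre.length "" = c := by
      rw [hline, List.getD_eq_getElem?_getD, List.getElem?_append_right (le_refl _)]
      simp
    have hcne : c ≠ "#" := by simp at hhs; exact fun e => hhs.1 e.symm
    rw [Bool.and_eq_true, Bool.and_eq_true]
    refine ⟨⟨?_, ?_⟩, ?_⟩
    · rw [startF]
      rcases hend with h | ⟨p, h⟩
      · subst h; simp
      · subst h
        rw [Bool.or_eq_true]
        right
        have hlp : (p ++ ["#"]).length - 1 = p.length := by simp
        rw [hlp, hline, List.append_assoc, List.getD_eq_getElem?_getD,
          List.getElem?_append_right (le_refl _)]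
        simp
    · rw [hcell]
      simp [bne, hcne]
    · rw [hdrop]
      exact chk_build w _ post hlen hhs hmf hsh

-- B's per-line test, as a proposition
theorem bline_iff (line : List String) (w : List Char) (hw : w ≠ []) :
    ((segsGo line []).any fun seg =>
        seg.length == w.length && (matchF seg w || matchF seg.reverse w)) = true ↔
      (ALine line w ∨ ALine line.reverse w) := by
  rw [List.any_eq_true]
  constructor
  · rintro ⟨s, hmem, hcond⟩
    simp only [Bool.and_eq_true, beq_iff_eq, Bool.or_eq_true] at hcond
    obtain ⟨hlen, hor⟩ := hcond
    have hseg := segAt_of_mem line.length line s le_rfl hmem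
    rcases hor with hm | hm
    · exact Or.inl ((aline_iff line w hw).mpr ⟨s, hseg, hlen, hm⟩)
    · right
      apply (aline_iff line.reverse w hw).mpr
      exact ⟨s.reverse, segAt_reverse line s hseg, by simpa using hlen, hm⟩
  · rintro (h | h)
    · obtain ⟨s, hseg, hlen, hm⟩ := (aline_iff line w hw).mp h
      exact ⟨s, mem_of_segAt line s hseg, by simp [hlen, hm]⟩
    · obtain ⟨s, hseg, hlen, hm⟩ := (aline_iff line.reverse w hw).mp h
      have hrev := segAt_reverse line.reverse s hseg
      rw [List.reverse_reverse] at hrev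
      refine ⟨s.reverse, mem_of_segAt line s.reverse hrev, ?_⟩
      simp only [Bool.and_eq_true, beq_iff_eq, Bool.or_eq_true]
      exact ⟨by simpa using hlen, Or.inr (by simpa using hm)⟩

-- index-set bridges between A's loops and per-line existentials
theorem exists_tryF_iff (line : List String) (w : List Char) (hw : w ≠ []) (m0 : Nat)
    (hm : line.length = m0) :
    (∃ a : Nat, a < m0 ∧ tryF line w a = true) ↔ ALine line w := by
  constructor
  · rintro ⟨a, _, h⟩; exact ⟨a, h⟩
  · rintro ⟨k, h⟩
    refine ⟨k, ?_, h⟩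
    by_contra hge
    rw [tryF_false_of_ge line w k hw (by omega)] at h
    exact Bool.false_ne_true h

theorem exists_tryF_rev_iff (line : List String) (w : List Char) (hw : w ≠ []) (m0 : Nat)
    (hm : line.length = m0) :
    (∃ a : Nat, a < m0 ∧ tryF line.reverse w (m0 - 1 - a) = true) ↔ ALine line.reverse w := by
  constructor
  · rintro ⟨a, _, h⟩; exact ⟨m0 - 1 - a, h⟩
  · rintro ⟨k, h⟩
    have hk : k < m0 := by
      by_contra hge
      rw [tryF_false_of_ge line.reverse w k hw (by simp [hm]; omega)] at h
      exact Bool.false_ne_true h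
    exact ⟨m0 - 1 - k, by omega, by rwa [show m0 - 1 - (m0 - 1 - k) = k by omega]⟩


theorem D_eq (board : List (List String)) (w : List Char) (a b : Nat)
    (hb : b < (board.headD []).length) :
    ((decide ((a : Int) - 1 < 0) || pvCell board ((a : Int) - 1) (b : Int) == "#")
        && (pvCell board (a : Int) (b : Int) != "#")
        && canPlaceA board (board.length : Int) ((board.headD []).length : Int) w
            (a : Int) (b : Int) 1 0 0)
      = tryF (colL board b) w a := by
  rw [canPlace_vert board ((board.headD []).length : Int) w (b : Int) (Int.natCast_nonneg b)
      (by exact_mod_cast hb) 1 0 (a : Int)]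
  rw [show ((b : Int)).toNat = b from by omega]
  rw [walkP_pos (colL board b) w 0 (a : Int) (Int.natCast_nonneg a)]
  rw [List.drop_zero, show ((a : Int)).toNat = a from by omega]
  rw [tryF, startF]
  simp only [pvCell_col]
  rw [show ((b : Int)).toNat = b from by omega, show ((a : Int)).toNat = a from by omega]
  have hstart : (decide ((a : Int) - 1 < 0)
        || (colL board b).getD ((a : Int) - 1).toNat "" == "#")
      = (decide (a = 0) || (colL board b).getD (a - 1) "" == "#") := by
    by_cases ha0 : a = 0
    · subst ha0
      rw [decide_eq_true (show ((0 : Nat) : Int) - 1 < 0 by norm_num),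
        decide_eq_true (show (0 : Nat) = 0 from rfl)]
      simp
    · rw [decide_eq_false (by omega : ¬ (a : Int) - 1 < 0), decide_eq_false ha0,
        show ((a : Int) - 1).toNat = a - 1 from by omega]
  rw [hstart]

theorem U_eq (board : List (List String)) (w : List Char) (a b : Nat)
    (ha : a < board.length) (hb : b < (board.headD []).length) :
    ((decide ((board.length : Int) ≤ (a : Int) + 1) || pvCell board ((a : Int) + 1) (b : Int) == "#")
        && (pvCell board (a : Int) (b : Int) != "#")
        && canPlaceA board (board.length : Int) ((board.headD []).length : Int) w
            (a : Int) (b : Int) (-1) 0 0)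
      = tryF (colL board b).reverse w (board.length - 1 - a) := by
  rw [canPlace_vert board ((board.headD []).length : Int) w (b : Int) (Int.natCast_nonneg b)
      (by exact_mod_cast hb) (-1) 0 (a : Int)]
  rw [show ((b : Int)).toNat = b from by omega]
  rw [walkP_neg (colL board b) w 0 (a : Int)]
  rw [show (((colL board b).length : Int)) = ((board.length : Int)) from by rw [length_colL]]
  rw [walkP_pos ((colL board b).reverse) w 0 ((board.length : Int) - 1 - (a : Int)) (by omega)]
  rw [List.drop_zero,
    show ((board.length : Int) - 1 - (a : Int)).toNat = board.length - 1 - a from by omega]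
  rw [tryF, startF]
  simp only [pvCell_col]
  rw [show ((b : Int)).toNat = b from by omega, show ((a : Int)).toNat = a from by omega,
    show ((a : Int) + 1).toNat = a + 1 from by omega]
  have hcell : (colL board b).reverse.getD (board.length - 1 - a) "" = (colL board b).getD a "" := by
    rw [show board.length - 1 - a = (colL board b).length - 1 - a from by rw [length_colL]]
    exact getD_reverse _ _ (by rw [length_colL]; omega)
  rw [hcell]
  have hstart : (decide ((board.length : Int) ≤ (a : Int) + 1)
        || (colL board b).getD (a + 1) "" == "#")
      = (decide (board.length - 1 - a = 0)
        || (colL board b).reverse.getD (board.length - 1 - a - 1) "" == "#") := by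
    by_cases hl : board.length ≤ a + 1
    · rw [decide_eq_true (show (board.length : Int) ≤ (a : Int) + 1 from by exact_mod_cast hl),
        decide_eq_true (show board.length - 1 - a = 0 from by omega)]
      simp
    · have hgd : (colL board b).reverse.getD (board.length - 1 - a - 1) ""
          = (colL board b).getD (a + 1) "" := by
        rw [show board.length - 1 - a - 1 = (colL board b).length - 1 - (a + 1) from by
          rw [length_colL]; omega]
        exact getD_reverse _ _ (by rw [length_colL]; omega)
      rw [hgd,
        decide_eq_false (show ¬ (board.length : Int) ≤ (a : Int) + 1 from by exact_mod_cast hl),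
        decide_eq_false (by omega : ¬ board.length - 1 - a = 0)]
  rw [hstart]

-- row a of the m x n grid (the row truncated to the first row's width)
def rowT (board : List (List String)) (a : Nat) : List String :=
  (board.getD a []).take (board.headD []).length

theorem length_rowT (board : List (List String))
    (hrows : ∀ r ∈ board, (board.headD []).length ≤ r.length) (a : Nat)
    (ha : a < board.length) : (rowT board a).length = (board.headD []).length := by
  rw [rowT, List.length_take]
  have h1 : (board.headD []).length ≤ (board.getD a []).length := by
    rw [List.getD_eq_getElem _ _ ha]
    exact hrows _ (List.getElem_mem _)
  omega

theorem getD_rowT (board : List (List String)) (a c : Nat)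
    (hc : c < (rowT board a).length) :
    (rowT board a).getD c "" = pvCell board (a : Int) (c : Int) := by
  have hc' : c < (board.getD a []).length := by
    rw [rowT, List.length_take] at hc; omega
  rw [List.getD_eq_getElem _ _ hc]
  simp only [rowT]
  rw [List.getElem_take]
  rw [pvCell_row, show ((a : Int)).toNat = a from by omega,
    show ((c : Int)).toNat = c from by omega, rowL, List.getD_eq_getElem _ _ hc']

theorem minLen_ge (k : Nat) : ∀ l : List (List String), l ≠ [] →
    (∀ r ∈ l, k ≤ r.length) → k ≤ minLen l := by
  intro l
  induction l with
  | nil => intro h; exact absurd rfl h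
  | cons r rest ih =>
    intro _ hall
    cases rest with
    | nil => simpa [minLen] using hall r (by simp)
    | cons r2 rest2 =>
      have he : minLen (r :: r2 :: rest2) = min r.length (minLen (r2 :: rest2)) := rfl
      rw [he]
      have h2 := ih (by simp) (fun x hx => hall x (List.mem_cons_of_mem _ hx))
      have h1 := hall r (by simp)
      omega

theorem minLen_eq (board : List (List String)) (hb : board ≠ [])
    (hrows : ∀ r ∈ board, (board.headD []).length ≤ r.length) :
    minLen board = (board.headD []).length := by
  cases board with
  | nil => exact absurd rfl hb
  | cons r rest =>
    have hr : (List.headD (r :: rest) []).length ≤ r.length := hrows r (by simp)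
    cases rest with
    | nil => rfl
    | cons r2 rest2 =>
      have he : minLen (r :: r2 :: rest2) = min r.length (minLen (r2 :: rest2)) := rfl
      rw [he]
      have hge : (List.headD (r :: r2 :: rest2) []).length ≤ minLen (r2 :: rest2) :=
        minLen_ge _ _ (by simp) (fun x hx => hrows x (List.mem_cons_of_mem _ hx))
      have hh : (List.headD (r :: r2 :: rest2) []) = r := rfl
      rw [hh] at hr hge
      show min r.length (minLen (r2 :: rest2)) = r.length
      omega

theorem R_eq (board : List (List String)) (w : List Char) (a b : Nat)
    (ha : a < board.length)
    (hrows : ∀ r ∈ board, (board.headD []).length ≤ r.length)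
    (hb : b < (board.headD []).length) :
    ((decide ((b : Int) - 1 < 0) || pvCell board (a : Int) ((b : Int) - 1) == "#")
        && (pvCell board (a : Int) (b : Int) != "#")
        && canPlaceA board (board.length : Int) ((board.headD []).length : Int) w
            (a : Int) (b : Int) 0 1 0)
      = tryF (rowT board a) w b := by
  have hlen : (rowT board a).length = (board.headD []).length := length_rowT board hrows a ha
  rw [show ((board.headD []).length : Int) = (((rowT board a).length : Nat) : Int) from by
    rw [hlen]]
  rw [canPlace_horiz board w (a : Int) (Int.natCast_nonneg a) (by exact_mod_cast ha)
      (rowT board a) (fun c hc => getD_rowT board a c hc) 1 0 (b : Int)]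
  rw [walkP_pos (rowT board a) w 0 (b : Int) (Int.natCast_nonneg b)]
  rw [List.drop_zero, show ((b : Int)).toNat = b from by omega]
  rw [tryF, startF]
  rw [show pvCell board (a : Int) (b : Int) = (rowT board a).getD b "" from
    (getD_rowT board a b (by omega)).symm]
  have hstart : (decide ((b : Int) - 1 < 0) || pvCell board (a : Int) ((b : Int) - 1) == "#")
      = (decide (b = 0) || (rowT board a).getD (b - 1) "" == "#") := by
    by_cases hb0 : b = 0
    · subst hb0
      rw [decide_eq_true (show ((0 : Nat) : Int) - 1 < 0 by norm_num),
        decide_eq_true (show (0 : Nat) = 0 from rfl)]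
      simp
    · rw [show ((b : Int) - 1) = (((b - 1 : Nat)) : Int) from by omega,
        (getD_rowT board a (b - 1) (by omega)).symm,
        decide_eq_false (by omega : ¬ ((b - 1 : Nat) : Int) < 0), decide_eq_false hb0]
  rw [hstart]

theorem L_eq (board : List (List String)) (w : List Char) (a b : Nat)
    (ha : a < board.length)
    (hrows : ∀ r ∈ board, (board.headD []).length ≤ r.length)
    (hb : b < (board.headD []).length) :
    ((decide (((board.headD []).length : Int) ≤ (b : Int) + 1)
          || pvCell board (a : Int) ((b : Int) + 1) == "#")
        && (pvCell board (a : Int) (b : Int) != "#")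
        && canPlaceA board (board.length : Int) ((board.headD []).length : Int) w
            (a : Int) (b : Int) 0 (-1) 0)
      = tryF (rowT board a).reverse w ((board.headD []).length - 1 - b) := by
  have hlen : (rowT board a).length = (board.headD []).length := length_rowT board hrows a ha
  rw [show ((board.headD []).length : Int) = (((rowT board a).length : Nat) : Int) from by
    rw [hlen]]
  rw [canPlace_horiz board w (a : Int) (Int.natCast_nonneg a) (by exact_mod_cast ha)
      (rowT board a) (fun c hc => getD_rowT board a c hc) (-1) 0 (b : Int)]
  rw [walkP_neg (rowT board a) w 0 (b : Int)]
  rw [walkP_pos ((rowT board a).reverse) w 0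
      (((rowT board a).length : Int) - 1 - (b : Int)) (by omega)]
  rw [List.drop_zero,
    show (((rowT board a).length : Int) - 1 - (b : Int)).toNat
      = (rowT board a).length - 1 - b from by omega]
  rw [hlen]
  rw [tryF, startF]
  have hcell : (rowT board a).reverse.getD ((board.headD []).length - 1 - b) ""
      = (rowT board a).getD b "" := by
    rw [show (board.headD []).length - 1 - b = (rowT board a).length - 1 - b from by rw [hlen]]
    exact getD_reverse _ _ (by omega)
  rw [hcell]
  rw [show pvCell board (a : Int) (b : Int) = (rowT board a).getD b "" from
    (getD_rowT board a b (by omega)).symm]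
  have hstart : (decide (((board.headD []).length : Int) ≤ (b : Int) + 1)
        || pvCell board (a : Int) ((b : Int) + 1) == "#")
      = (decide ((board.headD []).length - 1 - b = 0)
        || (rowT board a).reverse.getD ((board.headD []).length - 1 - b - 1) "" == "#") := by
    by_cases hl : (board.headD []).length ≤ b + 1
    · rw [decide_eq_true
          (show ((board.headD []).length : Int) ≤ (b : Int) + 1 from by exact_mod_cast hl),
        decide_eq_true (show (board.headD []).length - 1 - b = 0 from by omega)]
      simp
    · have hgd : (rowT board a).reverse.getD ((board.headD []).length - 1 - b - 1) ""
          = (rowT board a).getD (b + 1) "" := by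
        rw [show (board.headD []).length - 1 - b - 1
            = (rowT board a).length - 1 - (b + 1) from by rw [hlen]; omega]
        exact getD_reverse _ _ (by omega)
      rw [hgd,
        show ((b : Int) + 1) = (((b + 1 : Nat)) : Int) from by omega,
        (getD_rowT board a (b + 1) (by omega)).symm,
        decide_eq_false
          (show ¬ ((board.headD []).length : Int) ≤ ((b + 1 : Nat) : Int) from by
            exact_mod_cast hl),
        decide_eq_false (by omega : ¬ (board.headD []).length - 1 - b = 0)]
  rw [hstart]

-- A as a proposition about the rows and columns of its m x n grid
theorem A_iff (board : List (List String)) (word : String) (hw : word.toList ≠ [])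
    (hrows : ∀ r ∈ board, (board.headD []).length ≤ r.length) :
    placeWordInCrossword board word = true ↔
      ((∃ b, b < (board.headD []).length ∧
          (ALine (colL board b) word.toList ∨ ALine (colL board b).reverse word.toList)) ∨
        (∃ a, a < board.length ∧
          (ALine (rowT board a) word.toList ∨ ALine (rowT board a).reverse word.toList))) := by
  simp only [placeWordInCrossword, List.any_eq_true, PySem.List.mem_pyRange_one]
  constructor
  · rintro ⟨i, ⟨hi0, him⟩, j, ⟨hj0, hjn⟩, hcond⟩
    lift i to ℕ using hi0 with a
    lift j to ℕ using hj0 with b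
    have ha : a < board.length := by exact_mod_cast him
    have hb : b < (board.headD []).length := by exact_mod_cast hjn
    rw [D_eq board word.toList a b hb, U_eq board word.toList a b ha hb,
      R_eq board word.toList a b ha hrows hb, L_eq board word.toList a b ha hrows hb] at hcond
    simp only [Bool.or_eq_true] at hcond
    rcases hcond with ((h | h) | h) | h
    · exact Or.inl ⟨b, hb, Or.inl ⟨a, h⟩⟩
    · exact Or.inl ⟨b, hb, Or.inr ⟨board.length - 1 - a, h⟩⟩
    · exact Or.inr ⟨a, ha, Or.inl ⟨b, h⟩⟩
    · exact Or.inr ⟨a, ha, Or.inr ⟨(board.headD []).length - 1 - b, h⟩⟩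
  · intro h
    have key : ∃ a b, a < board.length ∧ b < (board.headD []).length ∧
        (((tryF (colL board b) word.toList a = true ∨
          tryF (colL board b).reverse word.toList (board.length - 1 - a) = true) ∨
          tryF (rowT board a) word.toList b = true) ∨
          tryF (rowT board a).reverse word.toList ((board.headD []).length - 1 - b) = true) := by
      rcases h with ⟨b, hb, hAL | hAL⟩ | ⟨a, ha, hAL | hAL⟩
      · obtain ⟨a, ha, ht⟩ :=
          (exists_tryF_iff (colL board b) word.toList hw board.length (length_colL board b)).mpr hAL
        exact ⟨a, b, ha, hb, Or.inl (Or.inl (Or.inl ht))⟩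
      · obtain ⟨a, ha, ht⟩ :=
          (exists_tryF_rev_iff (colL board b) word.toList hw board.length
            (length_colL board b)).mpr hAL
        exact ⟨a, b, ha, hb, Or.inl (Or.inl (Or.inr ht))⟩
      · obtain ⟨b, hb, ht⟩ :=
          (exists_tryF_iff (rowT board a) word.toList hw (board.headD []).length
            (length_rowT board hrows a ha)).mpr hAL
        exact ⟨a, b, ha, hb, Or.inl (Or.inr ht)⟩
      · obtain ⟨b, hb, ht⟩ :=
          (exists_tryF_rev_iff (rowT board a) word.toList hw (board.headD []).length
            (length_rowT board hrows a ha)).mpr hAL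
        exact ⟨a, b, ha, hb, Or.inr ht⟩
    obtain ⟨a, b, ha, hb, ht⟩ := key
    refine ⟨(a : Int), ⟨Int.natCast_nonneg a, by exact_mod_cast ha⟩,
      (b : Int), ⟨Int.natCast_nonneg b, by exact_mod_cast hb⟩, ?_⟩
    rw [D_eq board word.toList a b hb, U_eq board word.toList a b ha hb,
      R_eq board word.toList a b ha hrows hb, L_eq board word.toList a b ha hrows hb]
    simp only [Bool.or_eq_true]
    exact ht

-- B as the same proposition
theorem B_iff (board : List (List String)) (word : String) (hb0 : board ≠ [])
    (hrows : ∀ r ∈ board, (board.headD []).length ≤ r.length)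
    (hw : word.toList ≠ []) :
    placeWordInCrossword_alt board word = true ↔
      ((∃ b, b < (board.headD []).length ∧
          (ALine (colL board b) word.toList ∨ ALine (colL board b).reverse word.toList)) ∨
        (∃ a, a < board.length ∧
          (ALine (rowT board a) word.toList ∨ ALine (rowT board a).reverse word.toList))) := by
  simp only [placeWordInCrossword_alt]
  rw [if_neg (show ¬ board.isEmpty = true from fun hh => hb0 (by simpa using hh))]
  rw [minLen_eq board hb0 hrows]
  rw [List.any_eq_true]
  constructor
  · rintro ⟨line, hmem, hany⟩
    rcases List.mem_append.mp hmem with hline | hcols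
    · obtain ⟨r, hr, hteq⟩ := List.mem_map.mp hline
      obtain ⟨a, ha, hge⟩ := List.mem_iff_getElem.mp hr
      right
      refine ⟨a, ha, ?_⟩
      have hrow : rowT board a = line := by
        rw [rowT, List.getD_eq_getElem _ _ ha, hge, hteq]
      rw [hrow]
      exact (bline_iff line word.toList hw).mp hany
    · obtain ⟨b, hbmem, heq⟩ := List.mem_map.mp hcols
      left
      refine ⟨b, List.mem_range.mp hbmem, ?_⟩
      have hcol : colL board b = line := heq
      rw [hcol]
      exact (bline_iff line word.toList hw).mp hany
  · rintro (⟨b, hb, h⟩ | ⟨a, ha, h⟩)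
    · refine ⟨colL board b, List.mem_append.mpr (Or.inr ?_), (bline_iff _ _ hw).mpr h⟩
      exact List.mem_map.mpr ⟨b, List.mem_range.mpr hb, rfl⟩
    · refine ⟨rowT board a, List.mem_append.mpr (Or.inl ?_), (bline_iff _ _ hw).mpr h⟩
      refine List.mem_map.mpr ⟨board.getD a [], ?_, rfl⟩
      rw [List.getD_eq_getElem _ _ ha]
      exact List.getElem_mem _

-- ===== VERDICT (by name: the statement is the Claim_ definition above) =====
theorem placeWordInCrossword_spec : Claim_equal_placeWordInCrossword := by
  intro board word _ hpre
  obtain ⟨hb0, hrows, hwne⟩ := hpre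
  have hw : word.toList ≠ [] := by
    intro hh
    apply hwne
    have h2 := congrArg String.ofList hh
    simpa using h2
  unfold Spec_placeWordInCrossword
  have hA := A_iff board word hw hrows
  have hB := B_iff board word hb0 hrows hw
  by_cases hAv : placeWordInCrossword board word = true
  · rw [hAv]
    exact (hB.mpr (hA.mp hAv)).symm
  · have hBv : placeWordInCrossword_alt board word ≠ true :=
      fun hbt => hAv (hA.mpr (hB.mp hbt))
    have hBf : placeWordInCrossword_alt board word = false := by
      cases h : placeWordInCrossword_alt board word
      · rfl
      · exact absurd h hBv
    rw [Bool.not_eq_true] at hAv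
    rw [hAv, hBf]
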